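-- pv_equiv track=rewrite | github.com/rows-s/py-twitch | twitch/utils.py | remove_not_valid_postfix
-- ===== SOURCE A (Python) =====
-- from typing import Iterable
--
-- def remove_not_valid_postfix(
--         string: str,
--         valid_symbols: Iterable[str] = None,
--         invalid_symbols: Iterable[str] = None
-- ):
--     """
--     Removes not valid postfix. Removes all symbols from the end that are not in `valid_symbols`
--     or are in `invalid_symbols`. Only one of `valid_symbols` or `invalid_symbols` must be specified.
--
--     Args:
--         string: str
--             string from which postfix must be removed
--         valid_symbols: Iterable[str] (Default: None)
--             Use if you want to specify small number of valid symbols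
--             if specified would work as "delete everything except these symbols"
--         invalid_symbols: Iterable[str] (Default: None)
--             Use if you want to specify small number of invalid symbols
--             if specified would work as "delete only these symbols"
--
--     Returns:
--         string without postfix
--     """
--     if valid_symbols is None and invalid_symbols is None:
--         raise TypeError('None of valid_symbols` and `invalid_symbols` is specified')
--     elif valid_symbols is not None and invalid_symbols is not None:
--         raise TypeError('Only one of `valid_symbols` and `invalid_symbols` must be specified')
--
--     index = len(string)
--
--     if valid_symbols is not None:
--         for symbol in reversed(string):
--             if symbol in valid_symbols:
--                 break
--             else:
--                 index -= 1
--     elif invalid_symbols is not None: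
--         for symbol in reversed(string):
--             if symbol not in invalid_symbols:
--                 break
--             else:
--                 index -= 1
--     return string[:index]
-- ===== SOURCE B (Python) =====
-- def remove_not_valid_postfix(
--         string,
--         valid_symbols=None,
--         invalid_symbols=None
-- ):
--     if valid_symbols is None and invalid_symbols is None:
--         raise TypeError('None of valid_symbols` and `invalid_symbols` is specified')
--     if valid_symbols is not None and invalid_symbols is not None:
--         raise TypeError('Only one of `valid_symbols` and `invalid_symbols` must be specified')
--     if valid_symbols is not None:
--         strip_chars = ''.join(c for c in string if c not in valid_symbols)
--     else:
--         strip_chars = ''.join(c for c in string if c in invalid_symbols)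
--     return string.rstrip(strip_chars)
-- ===== Notes on version B (the rewrite author's own statement) =====
-- stated objective: idiomatic
-- what changed: Replaces A's manual reversed-iteration index-decrement loop and slice by precomputing the string's characters that fail the keep test and doing a single str.rstrip(strip_chars) call (the two TypeError guards are kept).
import Mathlib
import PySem

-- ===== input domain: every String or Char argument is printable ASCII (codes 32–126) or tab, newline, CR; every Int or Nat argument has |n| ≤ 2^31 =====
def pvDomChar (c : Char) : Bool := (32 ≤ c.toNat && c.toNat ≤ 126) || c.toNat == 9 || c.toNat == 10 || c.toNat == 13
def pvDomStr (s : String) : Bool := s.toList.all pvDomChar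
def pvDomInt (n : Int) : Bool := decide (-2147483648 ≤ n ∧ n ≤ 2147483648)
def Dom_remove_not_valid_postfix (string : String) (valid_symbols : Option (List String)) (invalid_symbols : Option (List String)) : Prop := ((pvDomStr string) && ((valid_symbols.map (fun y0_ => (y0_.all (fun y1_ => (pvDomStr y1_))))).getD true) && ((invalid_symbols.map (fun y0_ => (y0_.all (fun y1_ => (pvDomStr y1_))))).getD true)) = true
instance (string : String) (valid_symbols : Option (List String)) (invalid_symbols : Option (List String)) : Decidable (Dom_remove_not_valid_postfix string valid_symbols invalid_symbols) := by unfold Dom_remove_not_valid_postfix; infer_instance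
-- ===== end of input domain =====

-- B replaces A's manual reverse index-decrement scan by building the string's not-to-keep
-- characters once and doing a single str.rstrip(strip_chars) call (objective: idiomatic).

-- ===== PORT A =====
-- the 'for symbol in reversed(string): if symbol in valid_symbols: break else: index -= 1' loop
def pvLoopValid (vs : List String) : List Char → Int → Int
  | [], index => index
  | c :: rest, index =>
      if vs.contains (String.ofList [c]) then index else pvLoopValid vs rest (index - 1)

-- the 'for symbol in reversed(string): if symbol not in invalid_symbols: break else: index -= 1' loop
def pvLoopInvalid (is_ : List String) : List Char → Int → Int
  | [], index => index
  | c :: rest, index =>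
      if !(is_.contains (String.ofList [c])) then index else pvLoopInvalid is_ rest (index - 1)

def remove_not_valid_postfix (string : String) (valid_symbols : Option (List String)) (invalid_symbols : Option (List String)) : String :=
  match valid_symbols, invalid_symbols with
  | none, none => ""        -- Python: raise TypeError (excluded by Pre_)
  | some _, some _ => ""    -- Python: raise TypeError (excluded by Pre_)
  | some vs, none =>
      let index := pvLoopValid vs string.toList.reverse (string.toList.length : Int)
      PySem.Str.slice string none (some index)
  | none, some is_ =>
      let index := pvLoopInvalid is_ string.toList.reverse (string.toList.length : Int)
      PySem.Str.slice string none (some index)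

-- ===== PORT B =====
-- hand port of str.rstrip(chars) (PySem has no rstrip-with-argument); exact: drops exactly
-- the trailing characters that occur in `chars`
def pvRstripChars (s : List Char) (chars : List Char) : List Char :=
  (s.reverse.dropWhile (fun c => chars.contains c)).reverse

def remove_not_valid_postfix_alt (string : String) (valid_symbols : Option (List String)) (invalid_symbols : Option (List String)) : String :=
  match valid_symbols, invalid_symbols with
  | none, none => ""        -- Python: raise TypeError (excluded by Pre_)
  | some _, some _ => ""    -- Python: raise TypeError (excluded by Pre_)
  | some vs, none =>
      let strip_chars := string.toList.filter (fun c => !(vs.contains (String.ofList [c])))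
      String.ofList (pvRstripChars string.toList strip_chars)
  | none, some is_ =>
      let strip_chars := string.toList.filter (fun c => is_.contains (String.ofList [c]))
      String.ofList (pvRstripChars string.toList strip_chars)

-- ===== PRECONDITION & SPEC =====
-- Pre_ excludes exactly the inputs on which A raises TypeError: both symbol arguments None,
-- or both specified.
def Pre_remove_not_valid_postfix (string : String) (valid_symbols : Option (List String)) (invalid_symbols : Option (List String)) : Prop :=
  valid_symbols.isSome = !invalid_symbols.isSome
instance (string : String) (valid_symbols : Option (List String)) (invalid_symbols : Option (List String)) : Decidable (Pre_remove_not_valid_postfix string valid_symbols invalid_symbols) := by unfold Pre_remove_not_valid_postfix; infer_instance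

def pvWitness_remove_not_valid_postfix : String × Option (List String) × Option (List String) :=
  ("ab!! ", some ["a", "b"], none)

def Spec_remove_not_valid_postfix (string : String) (valid_symbols : Option (List String)) (invalid_symbols : Option (List String)) (out : String) : Prop := out = remove_not_valid_postfix_alt string valid_symbols invalid_symbols
instance (string : String) (valid_symbols : Option (List String)) (invalid_symbols : Option (List String)) (out : String) : Decidable (Spec_remove_not_valid_postfix string valid_symbols invalid_symbols out) := by unfold Spec_remove_not_valid_postfix; infer_instance

-- ===== CLAIM (what is proved, stated in full; the proofs are below) =====
def Claim_equal_remove_not_valid_postfix : Prop := ∀ (string : String) (valid_symbols : Option (List String)) (invalid_symbols : Option (List String)), Dom_remove_not_valid_postfix string valid_symbols invalid_symbols → Pre_remove_not_valid_postfix string valid_symbols invalid_symbols → Spec_remove_not_valid_postfix string valid_symbols invalid_symbols (remove_not_valid_postfix string valid_symbols invalid_symbols)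

-- ===== LEMMAS AND PROOFS =====

-- A's loop counts, from the right, the run of characters failing the keep test
theorem pvLoopValid_eq (vs : List String) (r : List Char) (i : Int) :
    pvLoopValid vs r i = i - ((r.takeWhile (fun c => !(vs.contains (String.ofList [c])))).length : Int) := by
  induction r generalizing i with
  | nil => simp [pvLoopValid]
  | cons c rest ih =>
      by_cases h : String.ofList [c] ∈ vs
      · simp [pvLoopValid, h]
      · simp [pvLoopValid, h, ih]
        omega

theorem pvLoopInvalid_eq (is_ : List String) (r : List Char) (i : Int) :
    pvLoopInvalid is_ r i = i - ((r.takeWhile (fun c => is_.contains (String.ofList [c]))).length : Int) := by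
  induction r generalizing i with
  | nil => simp [pvLoopInvalid]
  | cons c rest ih =>
      by_cases h : String.ofList [c] ∈ is_
      · simp [pvLoopInvalid, h, ih]
        omega
      · simp [pvLoopInvalid, h]

-- on characters of s, membership in 's.toList.filter q' is just q
theorem contains_filter_of_mem {s : List Char} {q : Char → Bool} {c : Char} (hc : c ∈ s) :
    (s.filter q).contains c = q c := by
  by_cases h : q c = true
  · simp [List.mem_filter, hc, h]
  · simp only [Bool.not_eq_true] at h
    simp [List.contains_eq_mem, List.mem_filter, h]

-- dropWhile only looks at members
theorem dropWhile_congr_mem {α : Type} (f g : α → Bool) :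
    ∀ (l : List α), (∀ x ∈ l, f x = g x) → l.dropWhile f = l.dropWhile g
  | [], _ => rfl
  | x :: xs, h => by
      have hx := h x (List.mem_cons_self)
      by_cases hf : f x = true <;>
        simp [hf, hx ▸ hf,
              dropWhile_congr_mem f g xs (fun y hy => h y (List.mem_cons_of_mem _ hy))]

-- the common core: A's slice-by-counter equals B's reverse-dropWhile, for any strip test q
theorem core_eq (s : List Char) (q : Char → Bool) :
    s.take (((s.length : Int) - ((s.reverse.takeWhile q).length : Int)).toNat)
      = (s.reverse.dropWhile q).reverse := by
  have hsum : (s.reverse.takeWhile q).length + (s.reverse.dropWhile q).length = s.length := by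
    have := congrArg List.length (List.takeWhile_append_dropWhile (p := q) (l := s.reverse))
    rw [List.length_append, List.length_reverse] at this
    exact this
  have hnat : (((s.length : Int) - ((s.reverse.takeWhile q).length : Int)).toNat)
      = s.length - (s.reverse.takeWhile q).length := by omega
  have hsplit : s = (s.reverse.dropWhile q).reverse ++ (s.reverse.takeWhile q).reverse :=
    calc s = s.reverse.reverse := (List.reverse_reverse s).symm
      _ = (s.reverse.takeWhile q ++ s.reverse.dropWhile q).reverse := by
            rw [List.takeWhile_append_dropWhile]
      _ = _ := by rw [List.reverse_append]
  have hdl : (s.reverse.dropWhile q).reverse.length = s.length - (s.reverse.takeWhile q).length := by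
    simp; omega
  rw [hnat]
  calc s.take (s.length - (s.reverse.takeWhile q).length)
      = ((s.reverse.dropWhile q).reverse ++ (s.reverse.takeWhile q).reverse).take
          (s.reverse.dropWhile q).reverse.length := by rw [← hsplit, hdl]
    _ = (s.reverse.dropWhile q).reverse := List.take_left

-- one branch, fully assembled
theorem branch_eq (string : String) (q : Char → Bool) (i : Int)
    (hi : i = (string.toList.length : Int) - ((string.toList.reverse.takeWhile q).length : Int)) :
    PySem.Str.slice string none (some i)
      = String.ofList ((string.toList.reverse.dropWhile
          (fun c => (string.toList.filter q).contains c)).reverse) := by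
  have hd : string.toList.reverse.dropWhile (fun c => (string.toList.filter q).contains c)
      = string.toList.reverse.dropWhile q := by
    refine dropWhile_congr_mem _ _ _ (fun x hx => ?_)
    exact contains_filter_of_mem (List.mem_reverse.mp hx)
  have hi0 : 0 ≤ i := by
    have := (List.takeWhile_prefix (p := q) (l := string.toList.reverse)).length_le
    rw [List.length_reverse] at this
    omega
  apply String.ext
  show (PySem.Str.slice string none (some i)).toList = _
  rw [PySem.Str.toList_slice, PySem.Chars.slice_eq_listSlice,
      PySem.List.slice_to string.toList hi0, hi, String.toList_ofList, hd]
  exact core_eq string.toList q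

-- ===== VERDICT (by name: the statement is the Claim_ definition above) =====
theorem remove_not_valid_postfix_spec : Claim_equal_remove_not_valid_postfix := by
  intro string valid_symbols invalid_symbols _ hpre
  unfold Spec_remove_not_valid_postfix
  match valid_symbols, invalid_symbols with
  | none, none => simp [Pre_remove_not_valid_postfix] at hpre
  | some _, some _ => simp [Pre_remove_not_valid_postfix] at hpre
  | some vs, none =>
      show PySem.Str.slice string none (some (pvLoopValid vs string.toList.reverse _)) = _
      rw [pvLoopValid_eq]
      exact branch_eq string (fun c => !(vs.contains (String.ofList [c]))) _ rfl
  | none, some is_ =>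
      show PySem.Str.slice string none (some (pvLoopInvalid is_ string.toList.reverse _)) = _
      rw [pvLoopInvalid_eq]
      exact branch_eq string (fun c => is_.contains (String.ofList [c])) _ rfl
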